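-- pv_equiv track=rewrite | github.com/Krandheer/data-structure | gridtravel.py | grid_travel_path_list
-- ===== SOURCE A (Python) =====
-- def grid_travel_path_list(p, m, n, ans):
--     # last line return statement is what makes value to be returned after all execution,
--     if m == 1 and n == 1:
--         ans.append(p)
--         return
--     if m > 1:
--         grid_travel_path_list(p + "U", m - 1, n, ans)
--     if n > 1:
--         grid_travel_path_list(p + "L", m, n - 1, ans)
--
--     return ans
-- ===== SOURCE B (Python) =====
-- def grid_travel_path_list(p, m, n, ans):
--     # Iterative DFS with an explicit stack (same preorder: 'U' branch before 'L').
--     # Mutates ans by appending, like the original; return value is ans.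
--     stack = [(p, m, n)]
--     while stack:
--         q, a, b = stack.pop()
--         if a == 1 and b == 1:
--             ans.append(q)
--         else:
--             if b > 1:
--                 stack.append((q + "L", a, b - 1))
--             if a > 1:
--                 stack.append((q + "U", a - 1, b))
--     return ans
-- ===== Notes on version B (the rewrite author's own statement) =====
-- stated objective: alternative
-- what changed: Replaces A's two-branch recursion (building ans through nested recursive calls) by an iterative depth-first traversal over an explicit stack of (prefix,m,n) frames, pushing the 'L' child before the 'U' child so pops reproduce A's U-first preorder. Pre_ excludes the 1x1 case (A returns None, not a list) and depths over 900, where A's recursion raises RecursionError near CPython's limit.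
-- outside the precondition, e.g. on grid_travel_path_list('', 1, 1, []): A returns None, B returns ['']
import Mathlib
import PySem

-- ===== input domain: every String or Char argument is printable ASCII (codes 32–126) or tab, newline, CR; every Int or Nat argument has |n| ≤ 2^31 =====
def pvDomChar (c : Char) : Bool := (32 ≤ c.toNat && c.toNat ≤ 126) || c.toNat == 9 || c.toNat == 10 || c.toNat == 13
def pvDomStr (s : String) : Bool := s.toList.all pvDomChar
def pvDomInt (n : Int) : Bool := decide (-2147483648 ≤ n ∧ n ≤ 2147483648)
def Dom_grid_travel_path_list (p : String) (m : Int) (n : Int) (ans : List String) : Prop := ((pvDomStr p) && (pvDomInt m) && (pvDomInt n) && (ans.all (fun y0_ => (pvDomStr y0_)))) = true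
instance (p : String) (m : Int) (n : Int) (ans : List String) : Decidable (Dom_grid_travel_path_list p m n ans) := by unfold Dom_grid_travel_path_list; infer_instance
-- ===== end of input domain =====

-- B replaces A's recursion by an explicit-stack iterative DFS (same U-before-L order); objective: alternative, not faster.
-- A mutates ans in place (appends paths); B performs the same appends; the equivalence proved is about the return value.

-- ===== PORT A =====
-- A's recursion, modelling the in-place mutation of ans: the result is the final contents of ans
-- (which is also A's return value whenever ¬(m = 1 ∧ n = 1), i.e. on Pre_).
-- The Nat fuel only makes the recursion structural (kernel-reducible); pvGtA_fuel_irrelevant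
-- below proves the supplied fuel is always sufficient, so it never changes the computation.
def pvGtA (fuel : Nat) (p : String) (m : Int) (n : Int) (ans : List String) : List String :=
  match fuel with
  | 0 => ans
  | fuel + 1 =>
    if m = 1 ∧ n = 1 then ans ++ [p]
    else
      let ans1 := if m > 1 then pvGtA fuel (p ++ "U") (m - 1) n ans else ans
      if n > 1 then pvGtA fuel (p ++ "L") m (n - 1) ans1 else ans1

def grid_travel_path_list (p : String) (m : Int) (n : Int) (ans : List String) : List String :=
  pvGtA ((m - 1).toNat + (n - 1).toNat + 1) p m n ans

-- ===== PORT B =====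
-- weight of one stack frame; bounds the number of loop iterations (fuel)
def pvFrameWt (a b : Int) : Nat := 3 ^ ((a - 1).toNat + (b - 1).toNat)

-- the while loop of Source B: pop a frame, either append the finished path or push the children (L then U);
-- the fuel makes the loop structural and is proved sufficient below (pvGtLoopF_eq_rec)
def pvGtLoopF (fuel : Nat) (st : List (String × Int × Int)) (ans : List String) : List String :=
  match fuel, st with
  | _, [] => ans
  | 0, _ => ans
  | fuel + 1, (q, a, b) :: rest =>
    if a = 1 ∧ b = 1 then pvGtLoopF fuel rest (ans ++ [q])
    else
      let st1 := if b > 1 then (q ++ "L", a, b - 1) :: rest else rest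
      let st2 := if a > 1 then (q ++ "U", a - 1, b) :: st1 else st1
      pvGtLoopF fuel st2 ans

def grid_travel_path_list_alt (p : String) (m : Int) (n : Int) (ans : List String) : List String :=
  pvGtLoopF (pvFrameWt m n) [(p, m, n)] ans

-- ===== PRECONDITION & SPEC =====
-- Pre_ excludes m = 1 ∧ n = 1, where A returns None (no list value of the declared type; B returns the updated list there),
-- and grids with recursion depth (m-1)+(n-1) over 900, where A's recursion hits CPython's ~1000-frame limit and raises
-- RecursionError (the exact cutoff depends on interpreter stack state, so a safe margin is used).
def Pre_grid_travel_path_list (p : String) (m : Int) (n : Int) (ans : List String) : Prop :=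
  ¬(m = 1 ∧ n = 1) ∧ (m - 1).toNat + (n - 1).toNat ≤ 900
instance (p : String) (m : Int) (n : Int) (ans : List String) : Decidable (Pre_grid_travel_path_list p m n ans) := by unfold Pre_grid_travel_path_list; infer_instance
def pvWitness_grid_travel_path_list : String × Int × Int × List String := ("", 2, 2, [])

def Spec_grid_travel_path_list (p : String) (m : Int) (n : Int) (ans : List String) (out : List String) : Prop := out = grid_travel_path_list_alt p m n ans
instance (p : String) (m : Int) (n : Int) (ans : List String) (out : List String) : Decidable (Spec_grid_travel_path_list p m n ans out) := by unfold Spec_grid_travel_path_list; infer_instance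

-- ===== CLAIM (what is proved, stated in full; the proofs are below) =====
def Claim_equal_grid_travel_path_list : Prop := ∀ (p : String) (m : Int) (n : Int) (ans : List String), Dom_grid_travel_path_list p m n ans → Pre_grid_travel_path_list p m n ans → Spec_grid_travel_path_list p m n ans (grid_travel_path_list p m n ans)

-- ===== LEMMAS AND PROOFS =====
-- total weight of the stack: the loop's termination/fuel measure, used only in the proofs
def pvStackWt (st : List (String × Int × Int)) : Nat := (st.map (fun t => pvFrameWt t.2.1 t.2.2)).sum

theorem pvStackWt_cons (q : String) (a b : Int) (st : List (String × Int × Int)) :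
    pvStackWt ((q, a, b) :: st) = pvFrameWt a b + pvStackWt st := by
  simp [pvStackWt]

theorem pvFrame_pos (a b : Int) : 0 < pvFrameWt a b := by
  simp only [pvFrameWt]; positivity

theorem pvFrame_lt_U (a b : Int) (ha : 1 < a) : pvFrameWt (a - 1) b < pvFrameWt a b := by
  simp only [pvFrameWt]
  exact Nat.pow_lt_pow_right (by norm_num) (by omega)

theorem pvFrame_lt_L (a b : Int) (hb : 1 < b) : pvFrameWt a (b - 1) < pvFrameWt a b := by
  simp only [pvFrameWt]
  exact Nat.pow_lt_pow_right (by norm_num) (by omega)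

theorem pvFrame_split (a b : Int) (ha : 1 < a) (hb : 1 < b) :
    pvFrameWt (a - 1) b + pvFrameWt a (b - 1) < pvFrameWt a b := by
  simp only [pvFrameWt]
  have e1 : (a - 1 - 1).toNat + (b - 1).toNat + 1 = (a - 1).toNat + (b - 1).toNat := by omega
  have e2 : (a - 1).toNat + (b - 1 - 1).toNat = (a - 1 - 1).toNat + (b - 1).toNat := by omega
  rw [e2, ← e1, pow_succ]
  have hp : 0 < (3:ℕ) ^ ((a - 1 - 1).toNat + (b - 1).toNat) := by positivity
  omega

-- the supplied fuel never changes pvGtA's result: any fuel above the recursion depth agrees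
theorem pvGtA_fuel_irrelevant : ∀ (f1 f2 : Nat) (p : String) (m n : Int) (ans : List String),
    (m - 1).toNat + (n - 1).toNat < f1 → (m - 1).toNat + (n - 1).toNat < f2 →
    pvGtA f1 p m n ans = pvGtA f2 p m n ans := by
  intro f1
  induction f1 with
  | zero => intro f2 p m n ans h1 _; omega
  | succ f ih =>
    intro f2 p m n ans h1 h2
    match f2, h2 with
    | g + 1, h2 =>
      rw [pvGtA, pvGtA]
      by_cases hbase : m = 1 ∧ n = 1
      · simp [hbase]
      · simp only [if_neg hbase]
        by_cases ha : m > 1 <;> by_cases hb : n > 1 <;>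
          simp only [ha, hb, ite_false, if_true]
        · rw [ih g (p ++ "U") (m - 1) n ans (by omega) (by omega),
              ih g (p ++ "L") m (n - 1) _ (by omega) (by omega)]
        · rw [ih g (p ++ "U") (m - 1) n ans (by omega) (by omega)]
        · rw [ih g (p ++ "L") m (n - 1) ans (by omega) (by omega)]

theorem pvGtLoopF_nil (f : Nat) (ans : List String) : pvGtLoopF f [] ans = ans := by
  cases f <;> rfl

-- one-step unfolding of port A at its chosen fuel: exactly A's recursion
theorem pvGtA_unfold (p : String) (m n : Int) (ans : List String) :
    grid_travel_path_list p m n ans =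
      if m = 1 ∧ n = 1 then ans ++ [p]
      else
        let ans1 := if m > 1 then grid_travel_path_list (p ++ "U") (m - 1) n ans else ans
        if n > 1 then grid_travel_path_list (p ++ "L") m (n - 1) ans1 else ans1 := by
  simp only [grid_travel_path_list]
  rw [pvGtA]
  by_cases hbase : m = 1 ∧ n = 1
  · simp [hbase]
  · simp only [if_neg hbase]
    by_cases ha : m > 1 <;> by_cases hb : n > 1 <;>
      simp only [ha, hb, ite_false, if_true]
    · rw [pvGtA_fuel_irrelevant ((m - 1).toNat + (n - 1).toNat) ((m - 1 - 1).toNat + (n - 1).toNat + 1) (p ++ "U") (m - 1) n ans (by omega) (by omega),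
          pvGtA_fuel_irrelevant ((m - 1).toNat + (n - 1).toNat) ((m - 1).toNat + (n - 1 - 1).toNat + 1) (p ++ "L") m (n - 1) _ (by omega) (by omega)]
    · rw [pvGtA_fuel_irrelevant ((m - 1).toNat + (n - 1).toNat) ((m - 1 - 1).toNat + (n - 1).toNat + 1) (p ++ "U") (m - 1) n ans (by omega) (by omega)]
    · rw [pvGtA_fuel_irrelevant ((m - 1).toNat + (n - 1).toNat) ((m - 1).toNat + (n - 1 - 1).toNat + 1) (p ++ "L") m (n - 1) ans (by omega) (by omega)]

-- the loop's fuel is irrelevant as long as it covers the stack weight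
theorem pvGtLoopF_fuel_irrelevant : ∀ (f1 f2 : Nat) (st : List (String × Int × Int)) (ans : List String),
    pvStackWt st ≤ f1 → pvStackWt st ≤ f2 → pvGtLoopF f1 st ans = pvGtLoopF f2 st ans := by
  intro f1
  induction f1 with
  | zero =>
    intro f2 st ans h1 _
    match st with
    | [] => rw [pvGtLoopF_nil, pvGtLoopF_nil]
    | (q, a, b) :: rest =>
      exfalso; have := pvFrame_pos a b; have := pvStackWt_cons q a b rest; omega
  | succ f ih =>
    intro f2 st ans h1 h2
    match st with
    | [] => rw [pvGtLoopF_nil, pvGtLoopF_nil]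
    | (q, a, b) :: rest =>
      rw [pvStackWt_cons] at h1 h2
      have hpos := pvFrame_pos a b
      obtain ⟨g, rfl⟩ : ∃ g, f2 = g + 1 := ⟨f2 - 1, by omega⟩
      rw [pvGtLoopF, pvGtLoopF]
      by_cases hbase : a = 1 ∧ b = 1
      · simp only [if_pos hbase]
        apply ih
        · have : pvFrameWt 1 1 = 1 := by simp [pvFrameWt]
          obtain ⟨h1', h2'⟩ := hbase; subst h1'; subst h2'; omega
        · have : pvFrameWt 1 1 = 1 := by simp [pvFrameWt]
          obtain ⟨h1', h2'⟩ := hbase; subst h1'; subst h2'; omega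
      · simp only [if_neg hbase]
        by_cases ha : a > 1 <;> by_cases hb : b > 1 <;>
          simp only [ha, hb, ite_false, if_true]
        · have := pvFrame_split a b ha hb
          apply ih <;> simp only [pvStackWt_cons] <;> omega
        · have := pvFrame_lt_U a b ha
          apply ih <;> simp only [pvStackWt_cons] <;> omega
        · have := pvFrame_lt_L a b hb
          apply ih <;> simp only [pvStackWt_cons] <;> omega
        · apply ih <;> omega

-- processing the top frame of the loop stack has exactly the effect of A's recursive call on that frame
theorem pvGtLoopF_pop (fuel : Nat) : ∀ (q : String) (a b : Int) (st : List (String × Int × Int)) (ans : List String),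
    pvStackWt ((q, a, b) :: st) ≤ fuel →
    pvGtLoopF fuel ((q, a, b) :: st) ans = pvGtLoopF fuel st (grid_travel_path_list q a b ans) := by
  induction fuel with
  | zero =>
    intro q a b st ans h
    exfalso; have := pvFrame_pos a b; have := pvStackWt_cons q a b st; omega
  | succ f ih =>
    intro q a b st ans h
    rw [pvStackWt_cons] at h
    have hpos := pvFrame_pos a b
    have hst : pvStackWt st ≤ f := by omega
    rw [pvGtLoopF, pvGtA_unfold q a b ans]
    by_cases hbase : a = 1 ∧ b = 1
    · simp only [if_pos hbase]
      exact pvGtLoopF_fuel_irrelevant f (f + 1) st (ans ++ [q]) hst (by omega)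
    · simp only [if_neg hbase]
      by_cases ha : a > 1 <;> by_cases hb : b > 1 <;>
        simp only [ha, hb, ite_false, if_true]
      · -- both children pushed: U is popped first, then L
        have hsplit := pvFrame_split a b ha hb
        have h1 : pvStackWt ((q ++ "U", a - 1, b) :: (q ++ "L", a, b - 1) :: st) ≤ f := by
          simp only [pvStackWt_cons]; omega
        have h2 : pvStackWt ((q ++ "L", a, b - 1) :: st) ≤ f := by
          have := pvFrame_pos (a - 1) b
          simp only [pvStackWt_cons]; omega
        rw [ih _ _ _ _ _ h1, ih _ _ _ _ _ h2]
        exact pvGtLoopF_fuel_irrelevant f (f + 1) st _ hst (by omega)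
      · have h1 : pvStackWt ((q ++ "U", a - 1, b) :: st) ≤ f := by
          have := pvFrame_lt_U a b ha
          simp only [pvStackWt_cons]; omega
        rw [ih _ _ _ _ _ h1]
        exact pvGtLoopF_fuel_irrelevant f (f + 1) st _ hst (by omega)
      · have h1 : pvStackWt ((q ++ "L", a, b - 1) :: st) ≤ f := by
          have := pvFrame_lt_L a b hb
          simp only [pvStackWt_cons]; omega
        rw [ih _ _ _ _ _ h1]
        exact pvGtLoopF_fuel_irrelevant f (f + 1) st _ hst (by omega)
      · exact pvGtLoopF_fuel_irrelevant f (f + 1) st ans hst (by omega)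

-- ===== VERDICT (by name: the statement is the Claim_ definition above) =====
theorem grid_travel_path_list_spec : Claim_equal_grid_travel_path_list := by
  intro p m n ans _ _
  unfold Spec_grid_travel_path_list grid_travel_path_list_alt
  rw [pvGtLoopF_pop (pvFrameWt m n) p m n [] ans (by simp [pvStackWt_cons, pvStackWt]),
      pvGtLoopF_nil]
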